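-- pv_equiv track=rewrite | github.com/Mohdjuzer/ocr | example.py | choose_best_result
-- ===== SOURCE A (Python) =====
-- def choose_best_result(results_list):
--     """
--     Choose the best result from multiple methods
--     """
--     # Filter out results with all zeros
--     valid_results = []
--     for result in results_list:
--         total = sum(result.values())
--         if total > 0:
--             valid_results.append(result)
--
--     if not valid_results:
--         return {'attempted': 0, 'not_attempted': 0, 'not_saved': 0}
--
--     # If we have valid results, pick the one with highest total
--     # (assuming more detected = more accurate)
--     best = max(valid_results, key=lambda x: sum(x.values()))
--     return best
-- ===== SOURCE B (Python) =====
-- def choose_best_result(results_list):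
--     best = None
--     best_total = 0
--     for result in results_list:
--         total = sum(result.values())
--         if total > 0 and (best is None or total > best_total):
--             best = result
--             best_total = total
--     if best is None:
--         return {'attempted': 0, 'not_attempted': 0, 'not_saved': 0}
--     return best
-- ===== Notes on version B (the rewrite author's own statement) =====
-- stated objective: simpler
-- what changed: Replaces the build-a-filtered-list-then-max two-pass structure with a single pass that maintains the running best result and its total (strict > keeps the first maximal result, matching max's first-wins rule).
import Mathlib
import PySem

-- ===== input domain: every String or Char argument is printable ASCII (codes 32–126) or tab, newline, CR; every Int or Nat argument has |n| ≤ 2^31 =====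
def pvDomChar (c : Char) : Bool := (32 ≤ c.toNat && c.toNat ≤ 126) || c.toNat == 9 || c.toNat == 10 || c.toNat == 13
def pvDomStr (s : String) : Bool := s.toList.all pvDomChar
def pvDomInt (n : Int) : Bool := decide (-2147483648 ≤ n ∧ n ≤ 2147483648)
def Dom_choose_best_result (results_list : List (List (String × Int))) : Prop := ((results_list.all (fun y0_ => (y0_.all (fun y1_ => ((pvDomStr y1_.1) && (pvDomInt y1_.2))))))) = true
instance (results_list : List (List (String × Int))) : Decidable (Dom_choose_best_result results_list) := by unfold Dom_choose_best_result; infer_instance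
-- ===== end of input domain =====

-- B is a single pass keeping the running best (strict >, so the first maximal result wins), instead of
-- A's filter-into-a-list then max; equivalence is proved for the return value on all inputs.

-- sum(result.values()) for a dict represented as an association list
def pvSumVals (r : List (String × Int)) : Int := (r.map Prod.snd).sum

-- ===== PORT A =====
def choose_best_result (results_list : List (List (String × Int))) : List (String × Int) :=
  -- valid_results = []; for result in results_list: if sum(result.values()) > 0: append
  let valid_results :=
    results_list.foldl (fun acc result => if pvSumVals result > 0 then acc ++ [result] else acc) []
  if valid_results = [] then
    [("attempted", 0), ("not_attempted", 0), ("not_saved", 0)]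
  else
    -- best = max(valid_results, key=lambda x: sum(x.values()))
    match PySem.List.max? valid_results (fun x => pvSumVals x) with
    | some best => best
    | none => []   -- unreachable: valid_results ≠ []

-- ===== PORT B =====
def choose_best_result_alt (results_list : List (List (String × Int))) : List (String × Int) :=
  -- best = None; best_total = 0; one pass keeping the running best
  let st :=
    results_list.foldl
      (fun (st : Option (List (String × Int)) × Int) result =>
        let total := pvSumVals result
        if total > 0 && (st.1.isNone || total > st.2) then (some result, total) else st)
      (none, 0)
  match st.1 with
  | none => [("attempted", 0), ("not_attempted", 0), ("not_saved", 0)]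
  | some best => best

-- ===== PRECONDITION & SPEC =====
def Spec_choose_best_result (results_list : List (List (String × Int))) (out : List (String × Int)) : Prop := out = choose_best_result_alt results_list
instance (results_list : List (List (String × Int))) (out : List (String × Int)) : Decidable (Spec_choose_best_result results_list out) := by unfold Spec_choose_best_result; infer_instance

-- ===== CLAIM (what is proved, stated in full; the proofs are below) =====
def Claim_equal_choose_best_result : Prop := ∀ (results_list : List (List (String × Int))), Dom_choose_best_result results_list → Spec_choose_best_result results_list (choose_best_result results_list)

-- ===== LEMMAS AND PROOFS =====

-- the running max over a list, seeded with b (first-wins on ties, like Python's max)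
def pvRunMax (b : List (String × Int)) (l : List (List (String × Int))) : List (String × Int) :=
  l.foldl (fun m x => if pvSumVals m < pvSumVals x then x else m) b

theorem pv_filter_acc (l : List (List (String × Int))) (acc : List (List (String × Int))) :
    l.foldl (fun acc r => if pvSumVals r > 0 then acc ++ [r] else acc) acc
      = acc ++ l.filter (fun r => decide (pvSumVals r > 0)) := by
  induction l generalizing acc with
  | nil => simp
  | cons x t ih =>
    simp only [List.foldl_cons, List.filter_cons]
    by_cases h : pvSumVals x > 0 <;> simp [h, ih]

theorem pv_max?_some (l : List (List (String × Int))) (b : List (String × Int)) :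
    PySem.List.max? (b :: l) (fun x => pvSumVals x) = some (pvRunMax b l) := by
  simp only [PySem.List.max?, pvRunMax, List.foldl_cons]
  induction l generalizing b with
  | nil => rfl
  | cons x t ih =>
    simp only [List.foldl_cons]
    by_cases h : pvSumVals b < pvSumVals x <;> simp [h, ih]

theorem pv_bfold_some (l : List (List (String × Int))) (b : List (String × Int))
    (hb : 0 < pvSumVals b) :
    l.foldl
      (fun (st : Option (List (String × Int)) × Int) result =>
        let total := pvSumVals result
        if total > 0 && (st.1.isNone || total > st.2) then (some result, total) else st)
      (some b, pvSumVals b)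
    = (some (pvRunMax b (l.filter (fun r => decide (pvSumVals r > 0)))),
       pvSumVals (pvRunMax b (l.filter (fun r => decide (pvSumVals r > 0))))) := by
  induction l generalizing b with
  | nil => simp [pvRunMax]
  | cons x t ih =>
    simp only [List.foldl_cons, List.filter_cons]
    by_cases hx : 0 < pvSumVals x
    · by_cases hlt : pvSumVals b < pvSumVals x
      · simpa [hx, hlt, pvRunMax] using ih x hx
      · simpa [hx, hlt, not_lt.mp hlt, pvRunMax] using ih b hb
    · simpa [hx, not_lt.mp (by simpa using hx)] using ih b hb

theorem pv_bfold_none (l : List (List (String × Int))) :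
    l.foldl
      (fun (st : Option (List (String × Int)) × Int) result =>
        let total := pvSumVals result
        if total > 0 && (st.1.isNone || total > st.2) then (some result, total) else st)
      (none, 0)
    = (match l.filter (fun r => decide (pvSumVals r > 0)) with
       | [] => (none, 0)
       | v :: vs => (some (pvRunMax v vs), pvSumVals (pvRunMax v vs))) := by
  induction l with
  | nil => rfl
  | cons x t ih =>
    simp only [List.foldl_cons, List.filter_cons]
    by_cases hx : 0 < pvSumVals x
    · simpa [hx] using pv_bfold_some t x hx
    · simpa [hx] using ih

-- ===== VERDICT (by name: the statement is the Claim_ definition above) =====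
theorem choose_best_result_spec : Claim_equal_choose_best_result := by
  intro results_list _
  unfold Spec_choose_best_result choose_best_result choose_best_result_alt
  rw [pv_filter_acc results_list [], List.nil_append, pv_bfold_none]
  cases h : results_list.filter (fun r => decide (pvSumVals r > 0)) with
  | nil => simp
  | cons v vs => simp [pv_max?_some]
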